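-- pv_equiv track=rewrite | github.com/Hl4t4/archive.org-roms-downloader | links.py | filetype_checker
-- ===== SOURCE A (Python) =====
-- def filetype_checker(line):
--     ######## Faltan los tipos de archivos partidos #########
--     ######## .app filetype genera problemas, quizas se solucione con regex en vez de in ###########
--     archives_filetypes = ['.7z', '.7zip', '.zip', '.tar.gz', '.gz', '.tar', '.gzip', '.rar']
--     disk_filetypes = ['.iso', '.img', '.bin', '.cue', '.chd', '.mdf', '.mds', '.ecm', '.cso', '.gcz', '.rvz', '.cdi', '.gdi', '.sbi', '.sub', '.nrg', '.isz', '.fds', '.ndd', '.adf', '.adz', '.adf.gz', '.dms', '.ipf']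
--     tape_filetypes = ['.wav', '.tap', '.tzx', '.cdc', '.cas']
--     rom_filetypes = ['.nes',  '.nez', '.unf', '.unif', '.smc', '.sfc', '.md', '.smd', '.gen', '.gg', '.z64', '.v64', '.n64', '.gb', '.gbc', '.gba', '.srl', '.gcm', '.gcz', '.xiso', '.nds', '.dsi', '.nds', '.ids', '.wbfs', '.wad', '.cia', '.3ds', '.nsp', '.xci', '.ngp', '.ngc', '.pce', '.vpk', '.vb', '.ws', '.wsc', '.bin', '.dat', '.lst', '.ipa', '.apk', '.obb']
--     other_filetypes = ['.elf', '.pbp', '.dol', '.xbe', '.xex', '.cfg', '.ini', '.dll', '.so', '.xml', '.hsi', '.lay', '.nv', '.m3u', '.rp9', '.paq9a']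
--     filetypes = list()
--     filetypes.extend(archives_filetypes)
--     filetypes.extend(disk_filetypes)
--     filetypes.extend(tape_filetypes)
--     filetypes.extend(rom_filetypes)
--     filetypes.extend(other_filetypes)
--     for filetype in filetypes:
--         if filetype in line:
--             return True
--     return False
-- ===== SOURCE B (Python) =====
-- def filetype_checker(line):
--     # One left-to-right scan over positions: at each index test all extensions at once
--     # via str.startswith with a tuple, instead of one full substring scan per extension.
--     filetypes = ('.7z', '.7zip', '.zip', '.tar.gz', '.gz', '.tar', '.gzip', '.rar', '.iso', '.img', '.bin', '.cue', '.chd', '.mdf', '.mds', '.ecm', '.cso', '.gcz', '.rvz', '.cdi', '.gdi', '.sbi', '.sub', '.nrg', '.isz', '.fds', '.ndd', '.adf', '.adz', '.adf.gz', '.dms', '.ipf', '.wav', '.tap', '.tzx', '.cdc', '.cas', '.nes', '.nez', '.unf', '.unif', '.smc', '.sfc', '.md', '.smd', '.gen', '.gg', '.z64', '.v64', '.n64', '.gb', '.gbc', '.gba', '.srl', '.gcm', '.gcz', '.xiso', '.nds', '.dsi', '.nds', '.ids', '.wbfs', '.wad', '.cia', '.3ds', '.nsp', '.xci', '.ngp',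 '.ngc', '.pce', '.vpk', '.vb', '.ws', '.wsc', '.bin', '.dat', '.lst', '.ipa', '.apk', '.obb', '.elf', '.pbp', '.dol', '.xbe', '.xex', '.cfg', '.ini', '.dll', '.so', '.xml', '.hsi', '.lay', '.nv', '.m3u', '.rp9', '.paq9a')
--     return any(line.startswith(filetypes, i) for i in range(len(line)))
-- ===== Notes on version B (the rewrite author's own statement) =====
-- stated objective: alternative
-- what changed: A loops over ~96 extensions running a full substring scan of the line for each; B makes one left-to-right scan over the positions of the line and tests all extensions at once at each position via str.startswith with a tuple (the position-major order of a regex-union search).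
import Mathlib
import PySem

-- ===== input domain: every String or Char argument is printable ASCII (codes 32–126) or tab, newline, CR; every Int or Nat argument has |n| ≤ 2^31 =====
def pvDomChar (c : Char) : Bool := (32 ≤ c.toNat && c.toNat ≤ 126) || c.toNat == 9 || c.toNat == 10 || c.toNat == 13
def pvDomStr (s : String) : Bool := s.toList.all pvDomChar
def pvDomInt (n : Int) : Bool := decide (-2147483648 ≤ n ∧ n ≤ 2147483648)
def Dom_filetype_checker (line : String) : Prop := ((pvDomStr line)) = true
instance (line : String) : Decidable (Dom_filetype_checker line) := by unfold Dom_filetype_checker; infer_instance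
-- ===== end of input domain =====

-- B replaces A's per-extension substring scans by one left-to-right scan over positions,
-- testing all extensions at each position (objective: alternative / idiomatic single pass).

-- ===== PORT A =====
def pvArchives : List String := [".7z", ".7zip", ".zip", ".tar.gz", ".gz", ".tar", ".gzip", ".rar"]
def pvDisk : List String := [".iso", ".img", ".bin", ".cue", ".chd", ".mdf", ".mds", ".ecm", ".cso", ".gcz", ".rvz", ".cdi", ".gdi", ".sbi", ".sub", ".nrg", ".isz", ".fds", ".ndd", ".adf", ".adz", ".adf.gz", ".dms", ".ipf"]
def pvTape : List String := [".wav", ".tap", ".tzx", ".cdc", ".cas"]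
def pvRom : List String := [".nes", ".nez", ".unf", ".unif", ".smc", ".sfc", ".md", ".smd", ".gen", ".gg", ".z64", ".v64", ".n64", ".gb", ".gbc", ".gba", ".srl", ".gcm", ".gcz", ".xiso", ".nds", ".dsi", ".nds", ".ids", ".wbfs", ".wad", ".cia", ".3ds", ".nsp", ".xci", ".ngp", ".ngc", ".pce", ".vpk", ".vb", ".ws", ".wsc", ".bin", ".dat", ".lst", ".ipa", ".apk", ".obb"]
def pvOther : List String := [".elf", ".pbp", ".dol", ".xbe", ".xex", ".cfg", ".ini", ".dll", ".so", ".xml", ".hsi", ".lay", ".nv", ".m3u", ".rp9", ".paq9a"]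

-- filetypes = [] extended by the five lists in order
def pvFiletypesA : List String := pvArchives ++ pvDisk ++ pvTape ++ pvRom ++ pvOther

-- for filetype in filetypes: if filetype in line: return True; return False
def filetype_checker (line : String) : Bool :=
  pvFiletypesA.any (fun ft => PySem.Str.isIn ft line)

-- ===== PORT B =====
def pvFiletypesB : List String := [".7z", ".7zip", ".zip", ".tar.gz", ".gz", ".tar", ".gzip", ".rar", ".iso", ".img", ".bin", ".cue", ".chd", ".mdf", ".mds", ".ecm", ".cso", ".gcz", ".rvz", ".cdi", ".gdi", ".sbi", ".sub", ".nrg", ".isz", ".fds", ".ndd", ".adf", ".adz", ".adf.gz", ".dms", ".ipf", ".wav", ".tap", ".tzx", ".cdc", ".cas", ".nes", ".nez", ".unf", ".unif", ".smc", ".sfc", ".md", ".smd", ".gen", ".gg", ".z64", ".v64", ".n64", ".gb", ".gbc", ".gba", ".srl", ".gcm", ".gcz", ".xiso", ".nds", ".dsi", ".nds", ".ids", ".wbfs", ".wad", ".cia", ".3ds", ".nsp", ".xci", ".ngp", ".ngc", ".pce", ".vpk", ".vb", ".ws", ".wsc", ".bin", ".dat", ".lst", ".ipa", ".apk", ".obb",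 ".elf", ".pbp", ".dol", ".xbe", ".xex", ".cfg", ".ini", ".dll", ".so", ".xml", ".hsi", ".lay", ".nv", ".m3u", ".rp9", ".paq9a"]

-- any(line.startswith(filetypes, i) for i in range(len(line)))
-- line.startswith(tuple, i) is: some extension is a prefix of line[i:]
def filetype_checker_alt (line : String) : Bool :=
  (List.range line.toList.length).any (fun i =>
    pvFiletypesB.any (fun e => PySem.Chars.startswith (line.toList.drop i) e.toList))

-- ===== PRECONDITION & SPEC =====
def Spec_filetype_checker (line : String) (out : Bool) : Prop := out = filetype_checker_alt line
instance (line : String) (out : Bool) : Decidable (Spec_filetype_checker line out) := by unfold Spec_filetype_checker; infer_instance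

-- ===== CLAIM (what is proved, stated in full; the proofs are below) =====
def Claim_equal_filetype_checker : Prop := ∀ (line : String), Dom_filetype_checker line → Spec_filetype_checker line (filetype_checker line)

-- ===== LEMMAS AND PROOFS =====
lemma pvLists_eq : pvFiletypesA = pvFiletypesB := by rfl

lemma pvFtB_nonempty : ∀ e ∈ pvFiletypesB, e.toList ≠ [] := by decide

-- a nonempty pattern is an infix iff it is a prefix of some drop i with i < length
lemma pvInfix_iff (sub s : List Char) (h : sub ≠ []) :
    sub <:+: s ↔ ∃ i < s.length, sub <+: s.drop i := by
  constructor
  · intro hinf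
    obtain ⟨j, hj⟩ := (PySem.Chars.exists_prefix_drop_iff_isIn sub s).mpr
      ((PySem.Chars.isIn_iff_infix sub s).mpr hinf)
    refine ⟨j, ?_, hj⟩
    by_contra hge
    rw [List.drop_eq_nil_of_le (by omega)] at hj
    exact h (List.prefix_nil.mp hj)
  · rintro ⟨i, _, hi⟩
    exact (PySem.Chars.isIn_iff_infix sub s).mp
      ((PySem.Chars.exists_prefix_drop_iff_isIn sub s).mp ⟨i, hi⟩)

lemma pvMain (line : String) : filetype_checker line = filetype_checker_alt line := by
  have : (filetype_checker line = true) ↔ (filetype_checker_alt line = true) := by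
    unfold filetype_checker filetype_checker_alt
    rw [pvLists_eq]
    simp only [List.any_eq_true, List.mem_range, PySem.Str.isIn_iff_infix,
      PySem.Chars.startswith_iff]
    constructor
    · rintro ⟨e, he, hinf⟩
      obtain ⟨i, hilt, hpre⟩ := (pvInfix_iff e.toList line.toList (pvFtB_nonempty e he)).mp hinf
      exact ⟨i, hilt, e, he, hpre⟩
    · rintro ⟨i, hilt, e, he, hpre⟩
      exact ⟨e, he, (pvInfix_iff e.toList line.toList (pvFtB_nonempty e he)).mpr ⟨i, hilt, hpre⟩⟩
  cases hA : filetype_checker line <;> cases hB : filetype_checker_alt line <;>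
    simp_all

-- ===== VERDICT (by name: the statement is the Claim_ definition above) =====
theorem filetype_checker_spec : Claim_equal_filetype_checker := by
  intro line _
  unfold Spec_filetype_checker
  exact pvMain line
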